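-- pv_equiv track=rewrite | github.com/parasiitism/AlgoDaily | leetcode/1764-form-array-by-concatenating-subarrays-of-another-array/main.py | canChoose
-- ===== SOURCE A (Python) =====
-- from typing import List
--
-- def canChoose(groups: List[List[int]], nums: List[int]) -> bool:
--     i = 0  # groups
--     j = 0  # nums
--     while i < len(groups) and j + len(groups[i]) <= len(nums):
--         matchCount = 0
--         codes = groups[i]
--         for k in range(len(codes)):
--             if codes[k] == nums[j+k]:
--                 matchCount += 1
--             else:
--                 break
--         # if the groups[i] matches part of the nums
--         if matchCount == len(codes):
--             i += 1
--             j += len(codes)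
--         else:
--             j += 1
--     return i == len(groups)
-- ===== SOURCE B (Python) =====
-- from typing import List
--
-- def canChoose(groups: List[List[int]], nums: List[int]) -> bool:
--     # Bottom-up DP: dp[j] == "the remaining (unprocessed) suffix of groups can be
--     # embedded, in order and disjointly, into nums starting at position j".
--     # Process groups back-to-front; greedy == DP since embeddability is monotone
--     # in the start position.
--     n = len(nums)
--     dp = [True] * (n + 1)
--     for g in reversed(groups):
--         L = len(g)
--         ndp = [False] * (n + 1)
--         for j in range(n, -1, -1):
--             ok = j + L <= n and nums[j:j+L] == g and dp[j+L]
--             ndp[j] = ok or (j < n and ndp[j+1])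
--         dp = ndp
--     return dp[0]
-- ===== Notes on version B (the rewrite author's own statement) =====
-- stated objective: alternative
-- what changed: Replaces A's greedy interleaved two-pointer scan with element-wise match counting by a bottom-up dynamic-programming table dp[j] = 'remaining groups embeddable starting at j', filled right-to-left once per group in reverse order; equal because embeddability is monotone in the start position, so greedy earliest matching equals the DP's existential choice (B always fills the whole table, so it does more work than A on large inputs).
import Mathlib
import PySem

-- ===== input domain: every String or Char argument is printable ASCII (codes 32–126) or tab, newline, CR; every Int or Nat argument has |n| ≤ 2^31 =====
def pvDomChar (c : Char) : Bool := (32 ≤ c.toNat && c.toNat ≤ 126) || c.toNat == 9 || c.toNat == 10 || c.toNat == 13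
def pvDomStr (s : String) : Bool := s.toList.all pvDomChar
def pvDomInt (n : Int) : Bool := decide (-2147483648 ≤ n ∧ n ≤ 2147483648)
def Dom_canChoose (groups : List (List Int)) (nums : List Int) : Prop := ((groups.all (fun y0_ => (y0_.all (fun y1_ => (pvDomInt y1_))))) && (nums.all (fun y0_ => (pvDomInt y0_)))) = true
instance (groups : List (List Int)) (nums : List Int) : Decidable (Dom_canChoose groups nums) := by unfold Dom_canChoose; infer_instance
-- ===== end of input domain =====

-- B replaces A's greedy two-pointer scan by a bottom-up DP table over all start positions,
-- built once per group in reverse order; objective: alternative (a different algorithm;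
-- B always fills the whole table, so it does more work than A on large inputs).

-- ===== PORT A =====
-- inner 'for k in range(len(codes))' loop with break, walking the codes list;
-- nums.getD is exact here because every reachable call has j + codes.length ≤ nums.length,
-- so the index j + k is always in range.
def matchLoop (nums : List Int) (j : Nat) : List Int → Nat → Nat → Nat
  | [], _, mc => mc
  | c :: rest, k, mc =>
    if c = nums.getD (j + k) 0 then matchLoop nums j rest (k+1) (mc+1) else mc

-- the while loop; 'fuel' only bounds the iteration count (each iteration increases i or j,
-- both bounded), so with the initial fuel the 0 branch is unreachable — a totality guard,
-- not a change of algorithm.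
def canChooseLoop (groups : List (List Int)) (nums : List Int) : Nat → Nat → Nat → Bool
  | 0, i, _ => i == groups.length
  | fuel+1, i, j =>
    if h1 : i < groups.length then
      if j + (groups[i]).length ≤ nums.length then
        if matchLoop nums j (groups[i]) 0 0 = (groups[i]).length then
          canChooseLoop groups nums fuel (i+1) (j + (groups[i]).length)
        else
          canChooseLoop groups nums fuel i (j+1)
      else i == groups.length
    else i == groups.length

def canChoose (groups : List (List Int)) (nums : List Int) : Bool :=
  canChooseLoop groups nums (groups.length + nums.length + 1) 0 0

-- ===== PORT B =====
-- 'ok = j + L <= n and nums[j:j+L] == g and dp[j+L]' of Source B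
def rowOk (g : List Int) (nums : List Int) (dp : List Bool) (j : Nat) : Bool :=
  decide (j + g.length ≤ nums.length) &&
  decide (PySem.List.slice nums (some (j : Int)) (some ((j : Int) + (g.length : Int))) = g) &&
  dp.getD (j + g.length) false

-- the inner 'for j in range(n, -1, -1)' loop of Source B, building the row ndp[j..n]
-- back-to-front; k counts the remaining iterations (j = n - k), the Python array write
-- ndp[j] = … becomes consing onto the already-built suffix, whose head is ndp[j+1].
def rowFrom (g : List Int) (nums : List Int) (dp : List Bool) : Nat → List Bool
  | 0 => [rowOk g nums dp nums.length]
  | k+1 =>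
    let rest := rowFrom g nums dp k
    (rowOk g nums dp (nums.length - (k+1)) || rest.headD false) :: rest

-- 'for g in reversed(groups)' with dp initialised to [True]*(n+1); result is dp[0]
def canChoose_alt (groups : List (List Int)) (nums : List Int) : Bool :=
  (groups.reverse.foldl (fun dp g => rowFrom g nums dp nums.length)
      (List.replicate (nums.length + 1) true)).getD 0 false

-- ===== PRECONDITION & SPEC =====
def Spec_canChoose (groups : List (List Int)) (nums : List Int) (out : Bool) : Prop := out = canChoose_alt groups nums
instance (groups : List (List Int)) (nums : List Int) (out : Bool) : Decidable (Spec_canChoose groups nums out) := by unfold Spec_canChoose; infer_instance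

-- ===== CLAIM (what is proved, stated in full; the proofs are below) =====
def Claim_equal_canChoose : Prop := ∀ (groups : List (List Int)) (nums : List Int), Dom_canChoose groups nums → Spec_canChoose groups nums (canChoose groups nums)

-- ===== LEMMAS AND PROOFS =====

-- proof-only specification: gs embeddable, in order and disjointly, into nums starting at j
def emb (nums : List Int) (gs : List (List Int)) (j : Nat) : Bool :=
  match gs with
  | [] => true
  | g :: rest =>
    if h : j + g.length ≤ nums.length then
      (decide (PySem.List.slice nums (some (j : Int)) (some ((j : Int) + (g.length : Int))) = g)
        && emb nums rest (j + g.length)) || emb nums (g :: rest) (j+1)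
    else false
termination_by (gs.length, nums.length + 1 - j)
decreasing_by
  · exact Prod.Lex.left _ _ (by simp)
  · exact Prod.Lex.right _ (by omega)

theorem emb_cons_iff (nums g : List Int) (rest : List (List Int)) :
    ∀ d j, nums.length + 1 - j = d →
      (emb nums (g :: rest) j = true ↔
        ∃ s, j ≤ s ∧ s + g.length ≤ nums.length ∧
          PySem.List.slice nums (some (s : Int)) (some ((s : Int) + (g.length : Int))) = g ∧
          emb nums rest (s + g.length) = true) := by
  intro d
  induction d with
  | zero =>
    intro j hd
    have hj : nums.length < j := by omega
    rw [emb]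
    simp only [dif_neg (by omega : ¬ j + g.length ≤ nums.length)]
    constructor
    · intro h; exact absurd h (by simp)
    · rintro ⟨s, hs1, hs2, -, -⟩; omega
  | succ d ih =>
    intro j hd
    by_cases hfit : j + g.length ≤ nums.length
    · rw [emb]
      simp only [dif_pos hfit, Bool.or_eq_true, Bool.and_eq_true, decide_eq_true_eq]
      rw [ih (j+1) (by omega)]
      constructor
      · rintro (⟨hsl, he⟩ | ⟨s, hs1, hs2, hs3, hs4⟩)
        · exact ⟨j, le_rfl, hfit, hsl, he⟩
        · exact ⟨s, by omega, hs2, hs3, hs4⟩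
      · rintro ⟨s, hs1, hs2, hs3, hs4⟩
        rcases Nat.eq_or_lt_of_le hs1 with h | h
        · exact Or.inl ⟨h ▸ hs3, h ▸ hs4⟩
        · exact Or.inr ⟨s, by omega, hs2, hs3, hs4⟩
    · rw [emb]
      simp only [dif_neg hfit]
      constructor
      · intro h; exact absurd h (by simp)
      · rintro ⟨s, hs1, hs2, -, -⟩; omega

theorem emb_mono (nums : List Int) (gs : List (List Int)) (j j' : Nat)
    (hj : j ≤ j') (h : emb nums gs j' = true) : emb nums gs j = true := by
  cases gs with
  | nil => rw [emb]
  | cons g rest =>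
    rw [emb_cons_iff nums g rest _ j rfl]
    obtain ⟨s, hs1, hs2, hs3, hs4⟩ := (emb_cons_iff nums g rest _ j' rfl).1 h
    exact ⟨s, by omega, hs2, hs3, hs4⟩

-- matchLoop reaches full length iff every position of the remaining codes matches
theorem matchLoop_full_iff (nums : List Int) (j : Nat) :
    ∀ (cs : List Int) (k mc : Nat),
      (matchLoop nums j cs k mc = mc + cs.length ↔
        ∀ m, m < cs.length → cs.getD m 0 = nums.getD (j + k + m) 0) := by
  intro cs
  induction cs with
  | nil => intro k mc; simp [matchLoop]
  | cons c rest ih =>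
    intro k mc
    by_cases he : c = nums.getD (j + k) 0
    · rw [matchLoop, if_pos he]
      simp only [List.length_cons]
      rw [show mc + (rest.length + 1) = (mc+1) + rest.length by omega]
      rw [ih (k+1) (mc+1)]
      constructor
      · intro hall m hm
        cases m with
        | zero => simpa using he
        | succ m =>
          have := hall m (by simpa using hm)
          simpa [Nat.add_assoc, Nat.add_comm, Nat.add_left_comm] using this
      · intro hall m hm
        have := hall (m+1) (by simpa using hm)
        simpa [Nat.add_assoc, Nat.add_comm, Nat.add_left_comm] using this
    · rw [matchLoop, if_neg he]
      constructor
      · intro h; exact absurd h (by simp)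
      · intro hall
        exact absurd (by simpa using hall 0 (by simp)) he

-- slice equality ↔ pointwise getD equality, when the window fits
theorem slice_eq_iff (g nums : List Int) (j : Nat) (h : j + g.length ≤ nums.length) :
    ((nums.drop j).take g.length = g ↔
      ∀ m, m < g.length → g.getD m 0 = nums.getD (j + m) 0) := by
  have hlen : ((nums.drop j).take g.length).length = g.length := by
    simp; omega
  constructor
  · intro heq m hm
    have h1 : j + m < nums.length := by omega
    rw [List.getD_eq_getElem g 0 hm, List.getD_eq_getElem nums 0 h1]
    rw [List.getElem_of_eq heq.symm hm]
    simp [List.getElem_take, List.getElem_drop]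
  · intro hall
    apply List.ext_getElem hlen
    intro m hm1 hm2
    have h1 : j + m < nums.length := by omega
    have := hall m hm2
    rw [List.getD_eq_getElem g 0 hm2, List.getD_eq_getElem nums 0 h1] at this
    simp [List.getElem_take, List.getElem_drop, this]

-- the match test of A's loop, in slice form
theorem matchLoop_slice (nums g : List Int) (j : Nat) (h : j + g.length ≤ nums.length) :
    (matchLoop nums j g 0 0 = g.length ↔
      PySem.List.slice nums (some (j : Int)) (some ((j : Int) + (g.length : Int))) = g) := by
  rw [PySem.List.slice_natCast_add, slice_eq_iff _ _ _ h]
  have h0 := matchLoop_full_iff nums j g 0 0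
  simpa using h0

-- the greedy loop of A computes exactly emb, given enough fuel
theorem greedy_emb (groups : List (List Int)) (nums : List Int) :
    ∀ fuel i j, i ≤ groups.length →
      (groups.length - i) + (nums.length - j) < fuel →
      canChooseLoop groups nums fuel i j = emb nums (groups.drop i) j := by
  intro fuel
  induction fuel with
  | zero => intro i j _ hf; omega
  | succ fuel ih =>
    intro i j hle hf
    by_cases h1 : i < groups.length
    · rw [List.drop_eq_getElem_cons h1]
      by_cases h2 : j + (groups[i]).length ≤ nums.length
      · by_cases hm : matchLoop nums j (groups[i]) 0 0 = (groups[i]).length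
        · have hslice := (matchLoop_slice nums (groups[i]) j h2).1 hm
          rw [canChooseLoop, dif_pos h1, if_pos h2, if_pos hm]
          rw [ih (i+1) (j + (groups[i]).length) (by omega) (by omega)]
          conv_rhs => rw [emb]
          simp only [dif_pos h2, hslice, decide_true, Bool.true_and]
          cases hrest : emb nums (groups.drop (i+1)) (j + (groups[i]).length) with
          | true => simp
          | false =>
            simp only [Bool.false_or]
            cases htail : emb nums (groups[i] :: groups.drop (i+1)) (j+1) with
            | false => rfl
            | true =>
              exfalso
              obtain ⟨s, hs1, hs2, hs3, hs4⟩ := (emb_cons_iff nums (groups[i]) (groups.drop (i+1)) _ (j+1) rfl).1 htail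
              have := emb_mono nums (groups.drop (i+1)) (j + (groups[i]).length) (s + (groups[i]).length) (by omega) hs4
              rw [hrest] at this; exact Bool.false_ne_true this
        · have hL : (groups[i]).length ≠ 0 := by
            intro h0
            apply hm
            have hnil : groups[i] = ([] : List Int) := List.eq_nil_of_length_eq_zero h0
            rw [hnil]; simp [matchLoop]
          have hslice : ¬ PySem.List.slice nums (some (j : Int)) (some ((j : Int) + ((groups[i]).length : Int))) = groups[i] := by
            intro hc; exact hm ((matchLoop_slice nums (groups[i]) j h2).2 hc)
          rw [canChooseLoop, dif_pos h1, if_pos h2, if_neg hm]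
          rw [ih i (j+1) hle (by omega)]
          rw [List.drop_eq_getElem_cons h1]
          conv_rhs => rw [emb]
          simp [dif_pos h2, hslice]
      · rw [canChooseLoop, dif_pos h1, if_neg h2, emb]
        simp [dif_neg h2, Nat.ne_of_lt h1]
    · have hii : i = groups.length := by omega
      rw [canChooseLoop, dif_neg h1, List.drop_of_length_le (by omega), emb]
      simp [hii]

theorem emb_cons_eq (nums g : List Int) (rest : List (List Int)) (j : Nat) :
    emb nums (g :: rest) j =
      if j + g.length ≤ nums.length then
        (decide (PySem.List.slice nums (some (j : Int)) (some ((j : Int) + (g.length : Int))) = g)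
          && emb nums rest (j + g.length)) || emb nums (g :: rest) (j+1)
      else false := by
  rw [emb]
  by_cases h : j + g.length ≤ nums.length
  · rw [dif_pos h, if_pos h]
  · rw [dif_neg h, if_neg h]

-- one row of B's DP computes emb (g :: rest), given dp computes emb rest
theorem rowFrom_spec (g : List Int) (nums : List Int) (rest : List (List Int)) (dp : List Bool)
    (hdp : ∀ j', j' ≤ nums.length → dp.getD j' false = emb nums rest j') :
    ∀ k, k ≤ nums.length →
      rowFrom g nums dp k = (List.range' (nums.length - k) (k+1)).map (fun j' => emb nums (g :: rest) j') := by
  have hok : ∀ j : Nat, j ≤ nums.length →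
      rowOk g nums dp j
      = ((decide (PySem.List.slice nums (some (j : Int)) (some ((j : Int) + (g.length : Int))) = g)
          && emb nums rest (j + g.length)) && decide (j + g.length ≤ nums.length)) := by
    intro j hj
    unfold rowOk
    by_cases hfit : j + g.length ≤ nums.length
    · rw [hdp _ hfit]; simp [hfit, Bool.and_comm]
    · simp [hfit]
  intro k
  induction k with
  | zero =>
    intro hk
    rw [rowFrom]
    rw [show nums.length - 0 = nums.length from rfl, List.range'_one, List.map_cons, List.map_nil]
    congr 1
    rw [hok nums.length le_rfl]
    rw [emb_cons_eq nums g rest nums.length]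
    by_cases hfit : nums.length + g.length ≤ nums.length
    · rw [if_pos hfit]
      have hnext : emb nums (g :: rest) (nums.length + 1) = false := by
        rw [emb_cons_eq, if_neg (by omega)]
      rw [hnext]
      simp [hfit]
    · rw [if_neg hfit]; simp [hfit]
  | succ k ihk =>
    intro hk
    have hj : nums.length - (k+1) < nums.length := by omega
    have hj1 : nums.length - (k+1) + 1 = nums.length - k := by omega
    rw [rowFrom]
    rw [ihk (by omega)]
    have hhead : ((List.range' (nums.length - k) (k+1)).map
        (fun j' => emb nums (g :: rest) j')).headD false = emb nums (g :: rest) (nums.length - k) := by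
      rw [List.range'_succ, List.map_cons, List.headD_cons]
    rw [hhead]
    rw [show List.range' (nums.length - (k+1)) ((k+1)+1) = (nums.length - (k+1)) :: List.range' (nums.length - (k+1) + 1) (k+1) from List.range'_succ, List.map_cons, hj1]
    congr 1
    rw [hok _ (by omega)]
    rw [emb_cons_eq nums g rest (nums.length - (k+1))]
    by_cases hfit : nums.length - (k+1) + g.length ≤ nums.length
    · rw [if_pos hfit]; simp [hfit, hj1]
    · rw [if_neg hfit]
      have hnext : emb nums (g :: rest) (nums.length - (k+1) + 1) = false := by
        rw [emb_cons_eq, if_neg (by omega)]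
      rw [hj1] at hnext
      rw [hnext]
      simp [hfit]

-- the reversed fold computes emb gs at every position
theorem fold_spec (nums : List Int) :
    ∀ gs : List (List Int),
      gs.reverse.foldl (fun dp g => rowFrom g nums dp nums.length) (List.replicate (nums.length + 1) true)
        = (List.range' 0 (nums.length + 1)).map (fun j' => emb nums gs j') := by
  intro gs
  induction gs with
  | nil =>
    simp only [List.reverse_nil, List.foldl_nil]
    apply List.ext_getElem (by simp)
    intro m hm1 hm2
    simp [emb]
  | cons g rest ih =>
    rw [List.reverse_cons, List.foldl_append, List.foldl_cons, List.foldl_nil, ih]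
    have hdp : ∀ j', j' ≤ nums.length →
        ((List.range' 0 (nums.length + 1)).map (fun j' => emb nums rest j')).getD j' false
          = emb nums rest j' := by
      intro j' hj'
      have hlt : j' < ((List.range' 0 (nums.length + 1)).map (fun j' => emb nums rest j')).length := by
        simp; omega
      rw [List.getD_eq_getElem _ _ hlt]
      simp
    have := rowFrom_spec g nums rest _ hdp nums.length le_rfl
    simpa using this

-- ===== VERDICT (by name: the statement is the Claim_ definition above) =====
theorem canChoose_spec : Claim_equal_canChoose := by
  intro groups nums _
  unfold Spec_canChoose canChoose canChoose_alt
  rw [fold_spec nums groups]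
  have h0 : ((List.range' 0 (nums.length + 1)).map (fun j' => emb nums groups j')).getD 0 false
      = emb nums groups 0 := by
    have hlt : 0 < ((List.range' 0 (nums.length + 1)).map (fun j' => emb nums groups j')).length := by
      simp
    rw [List.getD_eq_getElem _ _ hlt]
    simp [List.range'_succ]
  rw [h0]
  simpa using greedy_emb groups nums (groups.length + nums.length + 1) 0 0 (Nat.zero_le _) (by omega)
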